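-- pv_equiv track=rewrite | github.com/pavanvidem/chira | chira_extract.py | hybridization_positions
-- ===== SOURCE A (Python) =====
-- def hybridization_positions(dotbracket1, dotbracket2):
--     end1 = -1
--     end2 = -1
--     for i, c1 in enumerate(dotbracket1):
--         if dotbracket1[i] == '(':
--             end1 = i + 1
--             dotbracket1[i] = "."
--             for j, c2 in enumerate(reversed(dotbracket2)):
--                 if dotbracket2[j] == ')':
--                     end2 = j + 1
--                     dotbracket2[j] = '.'
--                     break
--     return end1, end2
-- ===== SOURCE B (Python) =====
-- def hybridization_positions(dotbracket1, dotbracket2):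
--     # single pass each: last '(' index and count in dotbracket1,
--     # then dot/record the first k ')' of dotbracket2 (same in-place mutations as A)
--     end1 = -1
--     k = 0
--     for i, c in enumerate(dotbracket1):
--         if c == '(':
--             end1 = i + 1
--             dotbracket1[i] = "."
--             k += 1
--     end2 = -1
--     if k:
--         rem = k
--         for j, c in enumerate(dotbracket2):
--             if c == ')':
--                 dotbracket2[j] = '.'
--                 end2 = j + 1
--                 rem -= 1
--                 if rem == 0:
--                     break
--     return end1, end2
-- ===== Notes on version B (the rewrite author's own statement) =====
-- stated objective: alternative
-- what changed: Replaced the nested loops (for every '(' in dotbracket1, rescan dotbracket2 from the front for the next un-dotted ')') by two independent linear passes: one pass over dotbracket1 records the last '(' position and the count k, one pass over dotbracket2 dots and records the first k ')'.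
import Mathlib
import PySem

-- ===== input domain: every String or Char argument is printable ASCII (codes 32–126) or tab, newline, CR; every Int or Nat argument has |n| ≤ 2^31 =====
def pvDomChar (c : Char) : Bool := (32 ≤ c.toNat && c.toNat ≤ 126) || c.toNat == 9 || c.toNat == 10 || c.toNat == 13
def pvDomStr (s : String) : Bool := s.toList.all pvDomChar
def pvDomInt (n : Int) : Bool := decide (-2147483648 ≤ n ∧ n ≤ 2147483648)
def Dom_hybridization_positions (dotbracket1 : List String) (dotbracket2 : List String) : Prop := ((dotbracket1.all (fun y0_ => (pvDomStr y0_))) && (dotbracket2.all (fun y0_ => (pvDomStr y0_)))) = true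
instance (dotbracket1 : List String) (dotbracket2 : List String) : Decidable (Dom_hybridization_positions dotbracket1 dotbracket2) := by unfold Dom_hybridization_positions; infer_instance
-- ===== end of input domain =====

-- B replaces A's nested rescans by two independent linear passes over the two lists.
-- Both Pythons mutate their list arguments in place (identically); the theorems here are about the return value.

-- ===== PORT A =====
-- inner loop: `for j, c2 in enumerate(reversed(dotbracket2)): if dotbracket2[j] == ')': …; break`
-- (the reversed iterator only drives j through 0..len-1; the test indexes the list directly,
-- so this is a forward index scan over the current dotbracket2)
def hpFindClose (db2 : List String) (j : Nat) (end2 : Int) : List String × Int :=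
  if h : j < db2.length then
    if db2[j] = ")" then (db2.set j ".", (j : Int) + 1)
    else hpFindClose db2 (j + 1) end2
  else (db2, end2)
termination_by db2.length - j

-- outer loop: `for i, c1 in enumerate(dotbracket1)`; mutations of dotbracket1 happen only at
-- indices already passed, so the enumerated element c is exactly what `dotbracket1[i]` reads
def hpOuter : List String → Nat → List String → Int → Int → Int × Int
  | [], _, _, e1, e2 => (e1, e2)
  | c :: rest, i, db2, e1, e2 =>
    if c = "(" then
      let p := hpFindClose db2 0 e2
      hpOuter rest (i + 1) p.1 ((i : Int) + 1) p.2
    else hpOuter rest (i + 1) db2 e1 e2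

def hybridization_positions (dotbracket1 : List String) (dotbracket2 : List String) : List Int :=
  let p := hpOuter dotbracket1 0 dotbracket2 (-1) (-1)
  [p.1, p.2]

-- ===== PORT B =====
-- first pass: last '(' position (as end1) and count k of '(' in dotbracket1
def hpScan1 : List String → Nat → Int → Nat → Int × Nat
  | [], _, e1, k => (e1, k)
  | c :: rest, i, e1, k =>
    if c = "(" then hpScan1 rest (i + 1) ((i : Int) + 1) (k + 1)
    else hpScan1 rest (i + 1) e1 k

-- second pass: position of the rem-th ')' (saturating at the last one), countdown `rem`
def hpScan2 : List String → Nat → Nat → Int → Int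
  | [], _, _, e2 => e2
  | c :: rest, j, rem, e2 =>
    if c = ")" then
      if rem = 1 then (j : Int) + 1
      else hpScan2 rest (j + 1) (rem - 1) ((j : Int) + 1)
    else hpScan2 rest (j + 1) rem e2

def hybridization_positions_alt (dotbracket1 : List String) (dotbracket2 : List String) : List Int :=
  let p := hpScan1 dotbracket1 0 (-1) 0
  let e2 := if p.2 = 0 then (-1 : Int) else hpScan2 dotbracket2 0 p.2 (-1)
  [p.1, e2]

-- ===== PRECONDITION & SPEC =====
def Spec_hybridization_positions (dotbracket1 : List String) (dotbracket2 : List String) (out : List Int) : Prop := out = hybridization_positions_alt dotbracket1 dotbracket2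
instance (dotbracket1 : List String) (dotbracket2 : List String) (out : List Int) : Decidable (Spec_hybridization_positions dotbracket1 dotbracket2 out) := by unfold Spec_hybridization_positions; infer_instance

-- ===== CLAIM (what is proved, stated in full; the proofs are below) =====
def Claim_equal_hybridization_positions : Prop := ∀ (dotbracket1 : List String) (dotbracket2 : List String), Dom_hybridization_positions dotbracket1 dotbracket2 → Spec_hybridization_positions dotbracket1 dotbracket2 (hybridization_positions dotbracket1 dotbracket2)

-- ===== LEMMAS AND PROOFS =====

-- structural model of one inner-loop run: dot the first ')' and return its index
def step'' : List String → Option (List String × Nat)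
  | [] => none
  | c :: rest =>
    if c = ")" then some ("." :: rest, 0)
    else (step'' rest).map (fun p => (c :: p.1, p.2 + 1))

-- index of the min(m, #')')-th ')' of l (m ≥ 1), none if l has no ')'
def kth : List String → Nat → Option Nat
  | [], _ => none
  | c :: rest, m =>
    if c = ")" then
      if m = 1 then some 0
      else match kth rest (m - 1) with
        | none => some 0
        | some d => some (d + 1)
    else (kth rest m).map (· + 1)

-- the A-side state evolution: one step per '('
def iterStep : Nat → List String × Int → List String × Int
  | 0, s => s
  | m + 1, s => iterStep m (hpFindClose s.1 0 s.2)

lemma step''_spec (l : List String) :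
    step'' l = (l.findIdx? (· = ")")).map (fun d => (l.set d ".", d)) := by
  induction l with
  | nil => simp [step'']
  | cons c rest ih =>
    by_cases h : c = ")"
    · simp [step'', h, List.findIdx?_cons]
    · simp [step'', h, List.findIdx?_cons, ih, Option.map_map]
      cases rest.findIdx? (· = ")") <;> simp [List.set_cons_succ]

lemma hpFindClose_cf (l : List String) (j : Nat) (e : Int) :
    hpFindClose l j e =
      match (l.drop j).findIdx? (· = ")") with
      | none => (l, e)
      | some d => (l.set (j + d) ".", (j : Int) + (d : Int) + 1) := by
  by_cases h : j < l.length
  · rw [hpFindClose, dif_pos h, List.drop_eq_getElem_cons h, List.findIdx?_cons]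
    by_cases hc : l[j] = ")"
    · simp [hc]
    · have := hpFindClose_cf l (j + 1) e
      simp only [hc, decide_false, this]
      cases hd : (l.drop (j + 1)).findIdx? (· = ")") with
      | none => simp
      | some d =>
        simp only [Option.map_some]
        have h1 : j + 1 + d = j + (d + 1) := by omega
        have h2 : ((j : Int) + 1) + (d : Int) + 1 = (j : Int) + ((d : Int) + 1) + 1 := by ring
        simp [h1, h2]
  · rw [hpFindClose, dif_neg h]
    have : l.drop j = [] := List.drop_eq_nil_of_le (by omega)
    simp [this]
termination_by l.length - j

lemma stepA_spec (l : List String) (e : Int) :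
    hpFindClose l 0 e =
      match step'' l with
      | none => (l, e)
      | some (r, d) => (r, (d : Int) + 1) := by
  rw [hpFindClose_cf, step''_spec]
  cases h : l.findIdx? (· = ")") <;> simp [h]

lemma step''_none_kth {l : List String} (h : step'' l = none) (m : Nat) :
    kth l m = none := by
  induction l generalizing m with
  | nil => simp [kth]
  | cons c rest ih =>
    by_cases hc : c = ")"
    · simp [step'', hc] at h
    · simp [step'', hc] at h
      simp [kth, hc, ih h]

lemma step''_kth_one {l : List String} {r : List String} {d : Nat}
    (h : step'' l = some (r, d)) : kth l 1 = some d := by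
  induction l generalizing r d with
  | nil => simp [step''] at h
  | cons c rest ih =>
    by_cases hc : c = ")"
    · simp [step'', hc] at h
      simp [kth, hc, h.2.symm]
    · simp [step'', hc] at h
      obtain ⟨r', d', h', hr, hd⟩ := h
      simp [kth, hc, ih h', ← hd]

lemma step''_kth_succ {l r : List String} {d : Nat}
    (h : step'' l = some (r, d)) (m : Nat) (hm : 1 ≤ m) :
    kth l (m + 1) = match kth r m with
      | none => some d
      | some d' => some d' := by
  induction l generalizing r d m with
  | nil => simp [step''] at h
  | cons c rest ih =>
    by_cases hc : c = ")"
    · simp [step'', hc] at h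
      obtain ⟨hr, hd⟩ := h
      subst hr hd
      have hm1 : ¬ (m + 1 = 1) := by omega
      simp only [kth, hc, if_true, hm1, if_false]
      have : m + 1 - 1 = m := by omega
      rw [this]
      have hdot : ¬ (("." : String) = ")") := by decide
      simp only [hdot, if_false]
      cases kth rest m <;> simp
    · simp [step'', hc] at h
      obtain ⟨r', d', h', hr, hd⟩ := h
      subst hr hd
      simp only [kth, hc, if_false]
      rw [ih h' m hm]
      cases kth r' m <;> simp

lemma iterStep_spec (m : Nat) (l : List String) (e : Int) (hm : 1 ≤ m) :
    (iterStep m (l, e)).2 = match kth l m with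
      | none => e
      | some d => (d : Int) + 1 := by
  induction m generalizing l e with
  | zero => omega
  | succ m ih =>
    rw [iterStep, stepA_spec]
    cases hs : step'' l with
    | none =>
      rw [step''_none_kth hs]
      have : ∀ k, (iterStep k (l, e)).2 = e := by
        intro k
        induction k with
        | zero => simp [iterStep]
        | succ k ihk =>
          rw [iterStep, stepA_spec, hs]
          exact ihk
      exact this m
    | some p =>
      obtain ⟨r, d⟩ := p
      rcases Nat.eq_zero_or_pos m with h0 | h1
      · subst h0
        simp [iterStep, step''_kth_one hs]
      · rw [ih r ((d : Int) + 1) h1, step''_kth_succ hs m h1]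
        cases kth r m <;> simp

lemma hpScan2_spec (l : List String) (j : Nat) (m : Nat) (e : Int) (hm : 1 ≤ m) :
    hpScan2 l j m e = match kth l m with
      | none => e
      | some d => (j : Int) + (d : Int) + 1 := by
  induction l generalizing j m e with
  | nil => simp [hpScan2, kth]
  | cons c rest ih =>
    by_cases hc : c = ")"
    · by_cases h1 : m = 1
      · simp [hpScan2, kth, hc, h1]
      · have hm1 : 1 ≤ m - 1 := by omega
        rw [hpScan2]
        simp only [hc, if_true, h1, if_false]
        rw [ih (j + 1) (m - 1) _ hm1]
        simp only [kth, if_true, h1, if_false]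
        cases kth rest (m - 1) with
        | none => simp
        | some d => simp; ring
    · rw [hpScan2]
      simp only [hc, if_false]
      rw [ih (j + 1) m e hm]
      simp only [kth, hc, if_false]
      cases kth rest m with
      | none => simp
      | some d => simp; ring

-- number of '(' entries
def cntOpen (l : List String) : Nat := l.countP (· = "(")

lemma hpScan1_snd (l : List String) (i : Nat) (e1 : Int) (k : Nat) :
    (hpScan1 l i e1 k).2 = k + cntOpen l := by
  induction l generalizing i e1 k with
  | nil => simp [hpScan1, cntOpen]
  | cons c rest ih =>
    by_cases hc : c = "(" <;>
      simp [hpScan1, hc, ih, cntOpen]; omega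

lemma hpOuter_spec (db1 : List String) (i : Nat) (db2 : List String) (e1 e2 : Int) (k : Nat) :
    hpOuter db1 i db2 e1 e2 =
      ((hpScan1 db1 i e1 k).1, (iterStep (cntOpen db1) (db2, e2)).2) := by
  induction db1 generalizing i db2 e1 e2 k with
  | nil => simp [hpOuter, hpScan1, cntOpen, iterStep]
  | cons c rest ih =>
    by_cases hc : c = "("
    · subst hc
      rw [hpOuter]
      rw [ih (i + 1) _ ((i : Int) + 1) _ (k + 1)]
      have hcnt : cntOpen ("(" :: rest) = cntOpen rest + 1 := by
        simp [cntOpen]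
      simp [hpScan1, hcnt, iterStep]
    · have hcnt : cntOpen (c :: rest) = cntOpen rest := by
        simp [cntOpen, hc]
      rw [hpOuter]
      simp only [hc, if_false]
      rw [ih (i + 1) db2 e1 e2 k, hcnt]
      simp [hpScan1, hc]

-- ===== VERDICT (by name: the statement is the Claim_ definition above) =====
theorem hybridization_positions_spec : Claim_equal_hybridization_positions := by
  intro db1 db2 _
  unfold Spec_hybridization_positions hybridization_positions hybridization_positions_alt
  rw [hpOuter_spec db1 0 db2 (-1) (-1) 0]
  simp only [hpScan1_snd, Nat.zero_add]
  rcases Nat.eq_zero_or_pos (cntOpen db1) with h0 | h1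
  · simp [h0, iterStep]
  · have hne : ¬ (cntOpen db1 = 0) := by omega
    simp only [if_neg hne, iterStep_spec _ _ _ h1, hpScan2_spec _ _ _ _ h1]
    cases kth db2 (cntOpen db1) <;> simp
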